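-- pv_equiv track=rewrite | github.com/IwanCole/PiLights | effects.py | conv_coords
-- ===== SOURCE A (Python) =====
-- def conv_coords( i ):
--     if i < 0 or i >= 24:
--         return conv_coords(i % 24)
--     elif i in range(8):
--         return (0, i)
--     elif i >= 16:
--         return (2, (i%8))
--     else:
--         return (1, 7-(i%8))
-- ===== SOURCE B (Python) =====
-- _GRID = [
--     (0, 0), (0, 1), (0, 2), (0, 3), (0, 4), (0, 5), (0, 6), (0, 7),
--     (1, 7), (1, 6), (1, 5), (1, 4), (1, 3), (1, 2), (1, 1), (1, 0),
--     (2, 0), (2, 1), (2, 2), (2, 3), (2, 4), (2, 5), (2, 6), (2, 7),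
-- ]
--
-- def conv_coords(i):
--     return _GRID[i % 24]
-- ===== Notes on version B (the rewrite author's own statement) =====
-- stated objective: simpler
-- what changed: Replaced the recursive normalization and three-way branch computation with a single precomputed coordinate table covering the whole grid, indexed by the index reduced modulo the grid size.
import Mathlib
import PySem

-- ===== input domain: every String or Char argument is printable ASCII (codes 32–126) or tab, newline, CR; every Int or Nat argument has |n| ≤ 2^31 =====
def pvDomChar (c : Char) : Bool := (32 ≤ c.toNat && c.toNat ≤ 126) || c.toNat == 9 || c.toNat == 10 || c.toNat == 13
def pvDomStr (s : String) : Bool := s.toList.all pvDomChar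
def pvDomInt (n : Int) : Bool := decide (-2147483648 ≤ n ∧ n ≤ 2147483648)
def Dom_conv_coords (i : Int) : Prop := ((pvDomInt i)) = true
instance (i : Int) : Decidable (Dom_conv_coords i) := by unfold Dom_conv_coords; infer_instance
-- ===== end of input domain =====

-- ===== PORT A =====
-- B replaces A's recursive normalization and branch computation with a precomputed 24-entry coordinate table (objective: simpler).
def conv_coords (i : Int) : Int × Int :=
  if i < 0 ∨ 24 ≤ i then conv_coords (PySem.Int.mod i 24)
  else if 0 ≤ i ∧ i < 8 then (0, i)      -- 'i in range(8)' for an int in [0,24)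
  else if 16 ≤ i then (2, PySem.Int.mod i 8)
  else (1, 7 - PySem.Int.mod i 8)
termination_by (if 0 ≤ i ∧ i < 24 then 0 else 1 : Nat)
decreasing_by
  have hm : PySem.Int.mod i 24 = i % 24 := PySem.Int.mod_eq_emod_of_pos (by norm_num)
  have h0 := Int.emod_nonneg i (show (24:Int) ≠ 0 by norm_num)
  have h2 := Int.emod_lt_of_pos i (show (0:Int) < 24 by norm_num)
  rw [hm]; split_ifs <;> omega

-- ===== PORT B =====
def pvGrid : List (Int × Int) :=
  [(0, 0), (0, 1), (0, 2), (0, 3), (0, 4), (0, 5), (0, 6), (0, 7),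
   (1, 7), (1, 6), (1, 5), (1, 4), (1, 3), (1, 2), (1, 1), (1, 0),
   (2, 0), (2, 1), (2, 2), (2, 3), (2, 4), (2, 5), (2, 6), (2, 7)]

def conv_coords_alt (i : Int) : Int × Int :=
  -- _GRID[i % 24]: the index is always in range, so the pyGet? never yields none; (0,0) is only a totalization default
  (PySem.List.pyGet? pvGrid (PySem.Int.mod i 24)).getD (0, 0)

-- ===== PRECONDITION & SPEC =====
def Spec_conv_coords (i : Int) (out : Int × Int) : Prop := out = conv_coords_alt i
instance (i : Int) (out : Int × Int) : Decidable (Spec_conv_coords i out) := by unfold Spec_conv_coords; infer_instance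

-- ===== CLAIM (what is proved, stated in full; the proofs are below) =====
def Claim_equal_conv_coords : Prop := ∀ (i : Int), Dom_conv_coords i → Spec_conv_coords i (conv_coords i)

-- ===== LEMMAS AND PROOFS =====
theorem conv_coords_in_range (i : Int) (h0 : 0 ≤ i) (h24 : i < 24) :
    conv_coords i = conv_coords_alt i := by
  rw [conv_coords.eq_def]
  simp only [conv_coords_alt,
    PySem.Int.mod_eq_emod_of_pos (show (0:Int) < 24 by norm_num),
    PySem.Int.mod_eq_emod_of_pos (show (0:Int) < 8 by norm_num)]
  rw [Int.emod_eq_of_lt h0 h24]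
  interval_cases i <;> decide

theorem conv_coords_alt_mod (i : Int) : conv_coords_alt (i % 24) = conv_coords_alt i := by
  simp only [conv_coords_alt,
    PySem.Int.mod_eq_emod_of_pos (show (0:Int) < 24 by norm_num)]
  rw [Int.emod_emod_of_dvd i (dvd_refl 24)]

-- ===== VERDICT (by name: the statement is the Claim_ definition above) =====
theorem conv_coords_spec : Claim_equal_conv_coords := by
  intro i _
  unfold Spec_conv_coords
  by_cases h : i < 0 ∨ 24 ≤ i
  · rw [conv_coords.eq_def, if_pos h]
    have hb : (0:Int) < 24 := by norm_num
    have hm : PySem.Int.mod i 24 = i % 24 := PySem.Int.mod_eq_emod_of_pos hb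
    have h0 : 0 ≤ i % 24 := Int.emod_nonneg i (by norm_num)
    have h24 : i % 24 < 24 := Int.emod_lt_of_pos i hb
    rw [hm, conv_coords_in_range _ h0 h24, conv_coords_alt_mod]
  · push_neg at h
    exact conv_coords_in_range i h.1 h.2
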